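-- pv_equiv track=rewrite | github.com/onco-eunho/graphql-request-parser | functions.py | parse_query_fields
-- ===== SOURCE A (Python) =====
-- def parse_query_fields(block: str, indent=0):
--     lines = block.strip().splitlines()
--     stack = []
--     result = []
--
--     for line in lines:
--         line = line.strip()
--         if not line or line.startswith("query "):
--             continue
--
--         if line.endswith('{'):
--             field = line[:-1].strip()
--             stack.append(field)
--         elif line == '}':
--             if stack:
--                 stack.pop()
--         else:
--             full_path = '.'.join(stack + [line])
--             result.append(full_path)
--     return result
-- ===== SOURCE B (Python) =====
-- def parse_query_fields(block: str, indent=0):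
--     lines = [s for s in (l.strip() for l in block.strip().splitlines())
--              if s and not s.startswith("query ")]
--
--     def walk(i, prefix):
--         # parse one nesting level starting at lines[i]; return (fields, index after the level)
--         out = []
--         while i < len(lines):
--             line = lines[i]
--             if line.endswith('{'):
--                 sub, i = walk(i + 1, prefix + [line[:-1].strip()])
--                 out.extend(sub)
--             elif line == '}':
--                 return out, i + 1
--             else:
--                 out.append('.'.join(prefix + [line]))
--                 i += 1
--         return out, i
--
--     result = []
--     i = 0
--     while i < len(lines):
--         line = lines[i]
--         if line.endswith('{'):
--             sub, i = walk(i + 1, [line[:-1].strip()])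
--             result.extend(sub)
--         elif line == '}':
--             i += 1  # unmatched closing brace at top level: ignore, like A's pop-only-if-nonempty
--         else:
--             result.append(line)
--             i += 1
--     return result
-- ===== Notes on version B (the rewrite author's own statement) =====
-- stated objective: alternative
-- what changed: Replaced A's single pass with an explicit stack of open fields by a recursive-descent parser over a pre-cleaned line list: a helper parses one nesting level (recursing on '{', returning on '}') while the top-level loop ignores unmatched closing braces.
import Mathlib
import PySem

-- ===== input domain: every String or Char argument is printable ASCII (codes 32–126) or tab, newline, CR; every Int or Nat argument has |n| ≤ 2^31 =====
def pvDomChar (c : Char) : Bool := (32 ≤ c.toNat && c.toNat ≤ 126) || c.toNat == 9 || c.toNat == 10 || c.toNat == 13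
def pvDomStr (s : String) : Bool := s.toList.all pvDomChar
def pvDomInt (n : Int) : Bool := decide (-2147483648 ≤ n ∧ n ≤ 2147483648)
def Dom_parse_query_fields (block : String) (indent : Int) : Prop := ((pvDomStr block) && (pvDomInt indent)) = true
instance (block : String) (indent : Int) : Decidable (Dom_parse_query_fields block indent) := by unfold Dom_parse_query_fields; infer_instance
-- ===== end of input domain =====

-- B replaces A's explicit-stack single pass by a recursive-descent parser over the
-- pre-cleaned line list (objective: alternative decomposition, same O(n) cost).

-- ===== PORT A =====
-- literal transliteration of A's loop: state = (stack, result)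
def pvStepA (acc : List String × List String) (rawline : String) : List String × List String :=
  let line := PySem.Str.strip rawline
  if line == "" || PySem.Str.startswith line "query " then acc
  else if PySem.Str.endswith line "{" then
    (acc.1 ++ [PySem.Str.strip (PySem.Str.slice line none (some (-1)))], acc.2)
  else if line == "}" then
    (if acc.1 = [] then acc.1 else acc.1.dropLast, acc.2)
  else
    (acc.1, acc.2 ++ [PySem.Str.join "." (acc.1 ++ [line])])

def parse_query_fields (block : String) (indent : Int) : List String :=
  let lines := PySem.Str.splitlines (PySem.Str.strip block)
  (lines.foldl pvStepA ([], [])).2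

-- ===== PORT B =====
-- the cleaned line list (B's list comprehension)
def pvClean (lines : List String) : List String :=
  lines.filterMap (fun l =>
    let s := PySem.Str.strip l
    if s == "" || PySem.Str.startswith s "query " then none else some s)

-- B's inner `walk`: parse one nesting level, return its fields and the remaining lines
-- (the subtype bound on the remainder is only what makes the recursion visibly terminating)
def pvWalk (lines : List String) (pfx : List String) :
    List String × {r : List String // r.length ≤ lines.length} :=
  match lines with
  | [] => ([], ⟨[], Nat.le_refl 0⟩)
  | line :: rest =>
    if PySem.Str.endswith line "{" then
      let w1 := pvWalk rest (pfx ++ [PySem.Str.strip (PySem.Str.slice line none (some (-1)))])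
      let w2 := pvWalk w1.2.1 pfx
      (w1.1 ++ w2.1, ⟨w2.2.1, Nat.le_trans (Nat.le_trans w2.2.2 w1.2.2) (Nat.le_succ _)⟩)
    else if line == "}" then
      ([], ⟨rest, Nat.le_succ _⟩)
    else
      let w := pvWalk rest pfx
      (PySem.Str.join "." (pfx ++ [line]) :: w.1, ⟨w.2.1, Nat.le_trans w.2.2 (Nat.le_succ _)⟩)
termination_by lines.length
decreasing_by
  · simp
  · have := w1.2.2; simp; omega
  · simp

-- B's top-level loop: a stray '}' here is ignored
def pvTop (lines : List String) : List String :=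
  match lines with
  | [] => []
  | line :: rest =>
    if PySem.Str.endswith line "{" then
      let w := pvWalk rest [PySem.Str.strip (PySem.Str.slice line none (some (-1)))]
      w.1 ++ pvTop w.2.1
    else if line == "}" then pvTop rest
    else line :: pvTop rest
termination_by lines.length
decreasing_by
  · have := w.2.2; simp; omega
  · simp
  · simp

def parse_query_fields_alt (block : String) (indent : Int) : List String :=
  pvTop (pvClean (PySem.Str.splitlines (PySem.Str.strip block)))

-- ===== PRECONDITION & SPEC =====
def Spec_parse_query_fields (block : String) (indent : Int) (out : List String) : Prop := out = parse_query_fields_alt block indent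
instance (block : String) (indent : Int) (out : List String) : Decidable (Spec_parse_query_fields block indent out) := by unfold Spec_parse_query_fields; infer_instance

-- ===== CLAIM (what is proved, stated in full; the proofs are below) =====
def Claim_equal_parse_query_fields : Prop := ∀ (block : String) (indent : Int), Dom_parse_query_fields block indent → Spec_parse_query_fields block indent (parse_query_fields block indent)

-- ===== LEMMAS AND PROOFS =====

-- A's step restricted to already-cleaned lines (strip/skip removed)
def pvStepA' (acc : List String × List String) (line : String) : List String × List String :=
  if PySem.Str.endswith line "{" then
    (acc.1 ++ [PySem.Str.strip (PySem.Str.slice line none (some (-1)))], acc.2)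
  else if line == "}" then
    (if acc.1 = [] then acc.1 else acc.1.dropLast, acc.2)
  else
    (acc.1, acc.2 ++ [PySem.Str.join "." (acc.1 ++ [line])])

theorem pv_foldA_clean (ls : List String) (acc : List String × List String) :
    ls.foldl pvStepA acc = (pvClean ls).foldl pvStepA' acc := by
  induction ls generalizing acc with
  | nil => rfl
  | cons l t ih =>
    by_cases h : (PySem.Str.strip l == "" || PySem.Str.startswith (PySem.Str.strip l) "query ") = true
    · have h1 : pvStepA acc l = acc := by simp only [pvStepA, h, if_true]
      have h2 : pvClean (l :: t) = pvClean t := by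
        simp only [pvClean, List.filterMap_cons, h, if_true]
      rw [List.foldl_cons, h1, h2, ih]
    · have h1 : pvStepA acc l = pvStepA' acc (PySem.Str.strip l) := by
        simp only [pvStepA, pvStepA', h, if_false, Bool.false_eq_true]
      have h2 : pvClean (l :: t) = PySem.Str.strip l :: pvClean t := by
        simp only [pvClean, List.filterMap_cons, h, if_false, Bool.false_eq_true]
      rw [List.foldl_cons, h1, h2, List.foldl_cons, ih]

-- the walk invariant: folding A' from a nonempty stack either reaches the matching '}'
-- (and continues from the popped stack) or exhausts the lines
theorem pv_walk_fold (n : Nat) (ls : List String) (hn : ls.length ≤ n)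
    (pfx : List String) (hp : pfx ≠ []) (res : List String) :
    ls.foldl pvStepA' (pfx, res) =
      (pvWalk ls pfx).2.1.foldl pvStepA' (pfx.dropLast, res ++ (pvWalk ls pfx).1)
    ∨ ((ls.foldl pvStepA' (pfx, res)).2 = res ++ (pvWalk ls pfx).1 ∧ (pvWalk ls pfx).2.1 = []) := by
  induction n generalizing ls pfx res with
  | zero =>
    have : ls = [] := by cases ls <;> simp_all
    subst this; right; simp [pvWalk]
  | succ n ih =>
    match ls with
    | [] => right; simp [pvWalk]
    | line :: rest =>
      have hr : rest.length ≤ n := by simp at hn; omega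
      by_cases hb : PySem.Str.endswith line "{" = true
      · have hstep : pvStepA' (pfx, res) line =
            (pfx ++ [PySem.Str.strip (PySem.Str.slice line none (some (-1)))], res) := by
          simp only [pvStepA']; rw [if_pos hb]
        rw [pvWalk]; simp only [hb, if_pos]
        set f := PySem.Str.strip (PySem.Str.slice line none (some (-1))) with hf
        rw [List.foldl_cons, hstep]
        rcases ih rest hr (pfx ++ [f]) (by simp) res with h1 | h1
        · rw [h1]
          set w1 := pvWalk rest (pfx ++ [f]) with hw1
          rw [List.dropLast_concat]
          rcases ih w1.2.1 (Nat.le_trans w1.2.2 hr) pfx hp (res ++ w1.1) with h2 | h2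
          · left; rw [h2]; simp
          · right
            constructor
            · rw [h2.1]; simp
            · exact h2.2
        · right
          set w1 := pvWalk rest (pfx ++ [f]) with hw1
          rw [h1.2]
          refine ⟨?_, ?_⟩
          · rw [h1.1]; simp [pvWalk]
          · simp [pvWalk]
      · by_cases hc : (line == "}") = true
        · left
          have heq : line = "}" := by simpa using hc
          subst heq
          have hstep : pvStepA' (pfx, res) "}" = (pfx.dropLast, res) := by
            simp only [pvStepA']; rw [if_neg hb, if_pos hc, if_neg hp]
          rw [pvWalk]; simp only [hb, hc, if_pos]
          rw [List.foldl_cons, hstep]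
          simp
        · have hstep : pvStepA' (pfx, res) line =
              (pfx, res ++ [PySem.Str.join "." (pfx ++ [line])]) := by
            simp only [pvStepA']; rw [if_neg hb, if_neg hc]
          rw [pvWalk]; simp only [hb, hc, if_false, Bool.false_eq_true]
          rw [List.foldl_cons, hstep]
          rcases ih rest hr pfx hp (res ++ [PySem.Str.join "." (pfx ++ [line])]) with h1 | h1
          · left; rw [h1]; simp
          · right
            exact ⟨by rw [h1.1]; simp, h1.2⟩

theorem pv_join_single (l : String) : PySem.Str.join "." ([] ++ [l]) = l := by
  simp [PySem.Str.join]

theorem pv_top_fold (n : Nat) (ls : List String) (hn : ls.length ≤ n) (res : List String) :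
    (ls.foldl pvStepA' ([], res)).2 = res ++ pvTop ls := by
  induction n generalizing ls res with
  | zero =>
    have : ls = [] := by cases ls <;> simp_all
    subst this; simp [pvTop]
  | succ n ih =>
    match ls with
    | [] => simp [pvTop]
    | line :: rest =>
      have hr : rest.length ≤ n := by simp at hn; omega
      by_cases hb : PySem.Str.endswith line "{" = true
      · rw [pvTop]; simp only [hb, if_pos]
        set f := PySem.Str.strip (PySem.Str.slice line none (some (-1))) with hf
        have hstep : pvStepA' (([] : List String), res) line = ([f], res) := by
          simp only [pvStepA']; rw [if_pos hb]; simp [hf]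
        rw [List.foldl_cons, hstep]
        set w1 := pvWalk rest [f] with hw1
        rcases pv_walk_fold rest.length rest (Nat.le_refl _) [f] (by simp) res with h1 | h1
        · rw [← hw1] at h1
          rw [h1]
          have : ([f] : List String).dropLast = [] := rfl
          rw [this]
          rw [ih w1.2.1 (Nat.le_trans w1.2.2 hr) (res ++ w1.1)]
          simp
        · rw [← hw1] at h1
          rw [h1.1, h1.2]
          simp [pvTop]
      · by_cases hc : (line == "}") = true
        · have heq : line = "}" := by simpa using hc
          subst heq
          rw [pvTop]; simp only [hb, hc, if_pos]
          have hstep : pvStepA' (([] : List String), res) "}" = ([], res) := by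
            simp only [pvStepA']; rw [if_neg hb, if_pos hc]; simp
          rw [List.foldl_cons, hstep]; exact ih rest hr res
        · rw [pvTop]; simp only [hb, hc, if_false, Bool.false_eq_true]
          have hstep : pvStepA' (([] : List String), res) line = ([], res ++ [line]) := by
            simp only [pvStepA']; rw [if_neg hb, if_neg hc, pv_join_single]
          rw [List.foldl_cons, hstep, ih rest hr]
          simp

-- ===== VERDICT (by name: the statement is the Claim_ definition above) =====
theorem parse_query_fields_spec : Claim_equal_parse_query_fields := by
  intro block indent _
  unfold Spec_parse_query_fields parse_query_fields parse_query_fields_alt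
  show (List.foldl pvStepA ([], []) (PySem.Str.splitlines (PySem.Str.strip block))).2 =
    pvTop (pvClean (PySem.Str.splitlines (PySem.Str.strip block)))
  rw [pv_foldA_clean]
  rw [pv_top_fold (pvClean (PySem.Str.splitlines (PySem.Str.strip block))).length _ (Nat.le_refl _) []]
  simp
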